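-- pv_equiv track=rewrite | github.com/aic-factcheck/aic-nlp-utils | aic_nlp_utils/split_merge.py | merge_chunks_greedy
-- ===== SOURCE A (Python) =====
-- from typing import List, Iterator, Tuple
--
-- def merge_chunks_greedy(
--     lengths: List[int],
--     maxLength: int
-- ) -> List[List[int]]:
--     """
--     Forward greedy: pack as much as possible into each segment
--     without exceeding maxLength.
--     - Oversize single chunks stay alone.
--     """
--     n = len(lengths)
--     i = 0
--     out = []
--     while i < n:
--         seg_sum = lengths[i]
--         j = i
--         if seg_sum > maxLength:
--             # oversize chunk → alone
--             out.append([i])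
--             i += 1
--             continue
--         while j + 1 < n and seg_sum + lengths[j+1] <= maxLength:
--             seg_sum += lengths[j+1]
--             j += 1
--         out.append(list(range(i, j+1)))
--         i = j + 1
--     return out
-- ===== SOURCE B (Python) =====
-- from typing import List
--
-- def merge_chunks_greedy(
--     lengths: List[int],
--     maxLength: int
-- ) -> List[List[int]]:
--     """Single flat pass with a running segment accumulator; flush on overflow.
--     A segment-starting chunk longer than maxLength is emitted alone."""
--     out = []
--     cur = []
--     seg_sum = 0
--     for idx, length in enumerate(lengths):
--         if cur and seg_sum + length > maxLength:
--             out.append(cur)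
--             cur = []
--             seg_sum = 0
--         if not cur and length > maxLength:
--             out.append([idx])
--             continue
--         cur.append(idx)
--         seg_sum += length
--     if cur:
--         out.append(cur)
--     return out
-- ===== Notes on version B (the rewrite author's own statement) =====
-- stated objective: simpler
-- what changed: Replaces A's (i,j) double-pointer outer/inner while loops with range() segment emission by a single flat for-pass over enumerate(lengths) that maintains a running segment accumulator and flushes it on overflow.
import Mathlib
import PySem

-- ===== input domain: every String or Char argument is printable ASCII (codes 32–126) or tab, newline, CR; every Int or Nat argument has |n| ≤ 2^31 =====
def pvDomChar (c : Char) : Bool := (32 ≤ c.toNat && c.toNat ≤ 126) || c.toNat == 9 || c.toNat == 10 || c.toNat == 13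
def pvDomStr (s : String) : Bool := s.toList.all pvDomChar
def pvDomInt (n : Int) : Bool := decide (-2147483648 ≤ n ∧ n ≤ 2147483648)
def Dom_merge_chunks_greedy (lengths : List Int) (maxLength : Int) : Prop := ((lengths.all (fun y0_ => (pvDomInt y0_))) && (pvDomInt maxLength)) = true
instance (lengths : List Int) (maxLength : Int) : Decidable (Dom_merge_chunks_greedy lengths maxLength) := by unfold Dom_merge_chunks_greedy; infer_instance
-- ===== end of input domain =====

-- B replaces A's (i,j) double-pointer while loops by a single flat pass with a running
-- segment accumulator flushed on overflow (objective: simpler).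

-- ===== PORT A =====
-- inner while loop of A: while j+1 < n and seg_sum + lengths[j+1] <= maxLength
-- (fuel-bounded recursion; the index j+1 is always in range where Python reads it,
-- so pyGetD with default 0 is exact)
def mcgInner (L : List Int) (M N : Int) : Nat → Int → Int → Int × Int
  | 0, s, j => (s, j)
  | f+1, s, j =>
    if j + 1 < N ∧ s + PySem.List.pyGetD L (j+1) 0 ≤ M then
      mcgInner L M N f (s + PySem.List.pyGetD L (j+1) 0) (j+1)
    else (s, j)

-- outer while loop of A (fuel = number of remaining iterations, i increases each pass)
def mcgOuter (L : List Int) (M N : Int) : Nat → Int → List (List Int)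
  | 0, _ => []
  | f+1, i =>
    if i < N then
      let s := PySem.List.pyGetD L i 0
      if s > M then
        [i] :: mcgOuter L M N f (i+1)
      else
        let sj := mcgInner L M N L.length s i
        PySem.List.pyRange i (sj.2 + 1) 1 :: mcgOuter L M N f (sj.2 + 1)
    else []

def merge_chunks_greedy (lengths : List Int) (maxLength : Int) : List (List Int) :=
  mcgOuter lengths maxLength (lengths.length : Int) lengths.length 0

-- ===== PORT B =====
-- loop body of B's single for-pass: state (out, cur, seg_sum), item (idx, length)
def mcgStep (M : Int) (st : List (List Int) × List Int × Int) (p : Int × Int) :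
    List (List Int) × List Int × Int :=
  let out := st.1; let cur := st.2.1; let s := st.2.2
  let st' := if cur ≠ [] ∧ s + p.2 > M then (out ++ [cur], ([] : List Int), (0 : Int))
             else (out, cur, s)
  if st'.2.1 = [] ∧ p.2 > M then (st'.1 ++ [[p.1]], st'.2.1, st'.2.2)
  else (st'.1, st'.2.1 ++ [p.1], st'.2.2 + p.2)

def merge_chunks_greedy_alt (lengths : List Int) (maxLength : Int) : List (List Int) :=
  let fin := (PySem.List.enumerate lengths 0).foldl (mcgStep maxLength) ([], [], 0)
  if fin.2.1 ≠ [] then fin.1 ++ [fin.2.1] else fin.1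

-- ===== PRECONDITION & SPEC =====
def Spec_merge_chunks_greedy (lengths : List Int) (maxLength : Int) (out : List (List Int)) : Prop := out = merge_chunks_greedy_alt lengths maxLength
instance (lengths : List Int) (maxLength : Int) (out : List (List Int)) : Decidable (Spec_merge_chunks_greedy lengths maxLength out) := by unfold Spec_merge_chunks_greedy; infer_instance

-- ===== CLAIM (what is proved, stated in full; the proofs are below) =====
def Claim_equal_merge_chunks_greedy : Prop := ∀ (lengths : List Int) (maxLength : Int), Dom_merge_chunks_greedy lengths maxLength → Spec_merge_chunks_greedy lengths maxLength (merge_chunks_greedy lengths maxLength)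

-- ===== LEMMAS AND PROOFS =====

-- finalization of B's state (the trailing `if cur: out.append(cur)`)
def mcgFin (st : List (List Int) × List Int × Int) : List (List Int) :=
  if st.2.1 ≠ [] then st.1 ++ [st.2.1] else st.1

theorem mcgInner_ge (L : List Int) (M N : Int) :
    ∀ (f : Nat) (s j : Int), j ≤ (mcgInner L M N f s j).2 := by
  intro f
  induction f with
  | zero => intro s j; simp [mcgInner]
  | succ f ih =>
    intro s j
    simp only [mcgInner]
    split
    · exact le_trans (by omega) (ih _ _)
    · simp

theorem mcgInner_exit (L : List Int) (M N : Int) (f : Nat) (s j : Int)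
    (h : ¬ (j + 1 < N ∧ s + PySem.List.pyGetD L (j+1) 0 ≤ M)) :
    mcgInner L M N f s j = (s, j) := by
  cases f with
  | zero => rfl
  | succ f => simp [mcgInner, h]

theorem mcgInner_fuel (L : List Int) (M N : Int) :
    ∀ (f : Nat) (s j : Int), (N - 1 - j).toNat ≤ f →
      mcgInner L M N (f+1) s j = mcgInner L M N f s j := by
  intro f
  induction f with
  | zero =>
    intro s j h
    have hN : ¬ (j + 1 < N ∧ s + PySem.List.pyGetD L (j+1) 0 ≤ M) := by
      intro ⟨h1, _⟩; omega
    simp [mcgInner, hN]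
  | succ f ih =>
    intro s j h
    by_cases hc : j + 1 < N ∧ s + PySem.List.pyGetD L (j+1) 0 ≤ M
    · have h2 : (N - 1 - (j+1)).toNat ≤ f := by omega
      simp only [mcgInner, hc, if_true]
      exact ih _ _ h2
    · simp [mcgInner, hc]

theorem mcgOuter_exit (L : List Int) (M N : Int) (f : Nat) (i : Int) (h : ¬ i < N) :
    mcgOuter L M N f i = [] := by
  cases f with
  | zero => rfl
  | succ f => simp [mcgOuter, h]

theorem mcgOuter_fuel (L : List Int) (M N : Int) :
    ∀ (f : Nat) (i : Int), 0 ≤ i → (N - i).toNat ≤ f →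
      mcgOuter L M N (f+1) i = mcgOuter L M N f i := by
  intro f
  induction f with
  | zero =>
    intro i h0 h
    have hN : ¬ i < N := by omega
    simp [mcgOuter, hN]
  | succ f ih =>
    intro i h0 h
    conv_lhs => rw [mcgOuter]
    conv_rhs => rw [mcgOuter]
    by_cases hi : i < N
    · simp only [hi, if_true]
      by_cases hs : PySem.List.pyGetD L i 0 > M
      · simp only [hs, if_true]
        rw [ih (i+1) (by omega) (by omega)]
      · simp only [hs, if_false]
        have hge := mcgInner_ge L M N L.length (PySem.List.pyGetD L i 0) i
        rw [ih _ (by omega) (by omega)]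
    · simp [hi]

theorem mcgOuter_unfold (L : List Int) (M N : Int) (f : Nat) (i : Int)
    (h0 : 0 ≤ i) (hf : (N - i).toNat ≤ f) (hi : i < N) :
    mcgOuter L M N f i =
      if PySem.List.pyGetD L i 0 > M then [i] :: mcgOuter L M N f (i+1)
      else
        PySem.List.pyRange i ((mcgInner L M N L.length (PySem.List.pyGetD L i 0) i).2 + 1) 1 ::
          mcgOuter L M N f ((mcgInner L M N L.length (PySem.List.pyGetD L i 0) i).2 + 1) := by
  cases f with
  | zero => omega
  | succ f =>
    conv_lhs => rw [mcgOuter]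
    simp only [hi, if_true]
    by_cases hs : PySem.List.pyGetD L i 0 > M
    · simp only [hs, if_true]
      rw [mcgOuter_fuel L M N f (i+1) (by omega) (by omega)]
    · simp only [hs, if_false]
      have hge := mcgInner_ge L M N L.length (PySem.List.pyGetD L i 0) i
      rw [mcgOuter_fuel L M N f _ (by omega) (by omega)]

theorem mcgInner_unfold (L : List Int) (M N : Int) (f : Nat) (s j : Int)
    (hf : (N - 1 - j).toNat ≤ f)
    (hc : j + 1 < N ∧ s + PySem.List.pyGetD L (j+1) 0 ≤ M) :
    mcgInner L M N f s j = mcgInner L M N f (s + PySem.List.pyGetD L (j+1) 0) (j+1) := by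
  cases f with
  | zero => omega
  | succ f =>
    conv_lhs => rw [mcgInner]
    simp only [hc, and_self, if_true]
    rw [mcgInner_fuel L M N f _ (j+1) (by omega)]

-- the main simulation: B's fold over the remaining enumerated suffix equals A's loops.
-- First conjunct: at a segment boundary (cur empty); second: inside an open segment.
theorem mcg_main (L : List Int) (M : Int) :
    ∀ (k i : Nat), i ≤ L.length → L.length - i = k →
      ((∀ out, mcgFin (((PySem.List.enumerate (L.drop i) (i : Int))).foldl (mcgStep M) (out, [], 0)) =
          out ++ mcgOuter L M (L.length : Int) L.length (i : Int)) ∧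
       (∀ out cur s, cur ≠ [] → 1 ≤ i →
          mcgFin (((PySem.List.enumerate (L.drop i) (i : Int))).foldl (mcgStep M) (out, cur, s)) =
            out ++ (cur ++ PySem.List.pyRange (i : Int) ((mcgInner L M (L.length : Int) L.length s ((i : Int) - 1)).2 + 1) 1) ::
              mcgOuter L M (L.length : Int) L.length ((mcgInner L M (L.length : Int) L.length s ((i : Int) - 1)).2 + 1))) := by
  intro k
  induction k with
  | zero =>
    intro i hile hk
    have hin : i = L.length := by omega
    subst hin
    have hout : mcgOuter L M (L.length : Int) L.length (L.length : Int) = [] :=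
      mcgOuter_exit L M _ _ _ (by omega)
    constructor
    · intro out
      simp [List.drop_length, PySem.List.enumerate_nil, mcgFin, hout]
    · intro out cur s hcur h1
      rw [mcgInner_exit L M _ _ _ _ (by rintro ⟨h, _⟩; omega)]
      have hr : PySem.List.pyRange ((L.length : Nat) : Int) (((L.length : Int) - 1) + 1) 1 = [] :=
        PySem.List.pyRange_one_eq_nil (by omega)
      have hout2 : mcgOuter L M (L.length : Int) L.length (((L.length : Int) - 1) + 1) = [] :=
        mcgOuter_exit L M _ _ _ (by omega)
      simp [List.drop_length, PySem.List.enumerate_nil, mcgFin, hcur, hr, hout]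
  | succ k ih =>
    intro i hile hk
    have hi : i < L.length := by omega
    have hdrop : L.drop i = L[i] :: L.drop (i+1) := List.drop_eq_getElem_cons hi
    have gi : PySem.List.pyGetD L (i : Int) 0 = L[i] := by
      simp [PySem.List.pyGetD_natCast, List.getD_eq_getElem?_getD, List.getElem?_eq_getElem hi]
    have hcast : ((i + 1 : Nat) : Int) = (i : Int) + 1 := by push_cast; ring
    obtain ⟨ihO, ihI⟩ := ih (i+1) (by omega) (by omega)
    rw [hcast] at ihO ihI
    have hNi : (i : Int) < (L.length : Int) := by exact_mod_cast hi
    have houter := mcgOuter_unfold L M (L.length : Int) L.length (i : Int) (by omega) (by omega) hNi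
    rw [gi] at houter
    constructor
    · -- boundary state
      intro out
      rw [hdrop, PySem.List.enumerate_cons, List.foldl_cons]
      by_cases hLi : L[i] > M
      · have hstep : mcgStep M (out, [], 0) ((i : Int), L[i]) = (out ++ [[(i : Int)]], [], 0) := by
          simp [mcgStep, hLi]
        rw [hstep, ihO, houter]
        simp [hLi]
      · have hstep : mcgStep M (out, [], 0) ((i : Int), L[i]) = (out, [(i : Int)], L[i]) := by
          simp [mcgStep, hLi]
        rw [hstep, ihI out [(i : Int)] L[i] (by simp) (by omega)]
        have hj1 : ((i : Int) + 1) - 1 = (i : Int) := by ring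
        rw [hj1, houter]
        have hge := mcgInner_ge L M (L.length : Int) L.length L[i] (i : Int)
        have hlt : (i : Int) < (mcgInner L M (L.length : Int) L.length L[i] (i : Int)).2 + 1 := by omega
        conv_rhs => rw [PySem.List.pyRange_one_cons hlt]
        simp [hLi]
    · -- inside an open segment
      intro out cur s hcur h1
      rw [hdrop, PySem.List.enumerate_cons, List.foldl_cons]
      have hj0 : ((i : Int) - 1) + 1 = (i : Int) := by ring
      by_cases hov : s + L[i] > M
      · -- flush
        have hexit : mcgInner L M (L.length : Int) L.length s ((i : Int) - 1) = (s, (i : Int) - 1) := by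
          apply mcgInner_exit
          rw [hj0, gi]
          rintro ⟨-, h2⟩; omega
        have hr : PySem.List.pyRange (i : Int) (((i : Int) - 1) + 1) 1 = [] :=
          PySem.List.pyRange_one_eq_nil (by omega)
        by_cases hLi : L[i] > M
        · have hstep : mcgStep M (out, cur, s) ((i : Int), L[i]) = (out ++ [cur] ++ [[(i : Int)]], [], 0) := by
            simp [mcgStep, hcur, hov, hLi]
          rw [hstep, ihO, hexit]
          simp only [hr, hj0]
          rw [houter]
          simp [hLi]
        · have hstep : mcgStep M (out, cur, s) ((i : Int), L[i]) = (out ++ [cur], [(i : Int)], L[i]) := by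
            simp [mcgStep, hcur, hov, hLi]
          rw [hstep, ihI (out ++ [cur]) [(i : Int)] L[i] (by simp) (by omega)]
          have hj1 : ((i : Int) + 1) - 1 = (i : Int) := by ring
          rw [hj1, hexit]
          simp only [hr, hj0]
          rw [houter]
          have hge := mcgInner_ge L M (L.length : Int) L.length L[i] (i : Int)
          have hlt : (i : Int) < (mcgInner L M (L.length : Int) L.length L[i] (i : Int)).2 + 1 := by omega
          conv_rhs => rw [PySem.List.pyRange_one_cons hlt]
          simp [hLi]
      · -- extend current segment
        have hstep : mcgStep M (out, cur, s) ((i : Int), L[i]) = (out, cur ++ [(i : Int)], s + L[i]) := by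
          simp [mcgStep, hcur, hov]
        rw [hstep, ihI out (cur ++ [(i : Int)]) (s + L[i]) (by simp) (by omega)]
        have hj1 : ((i : Int) + 1) - 1 = (i : Int) := by ring
        rw [hj1]
        have hstepin : mcgInner L M (L.length : Int) L.length s ((i : Int) - 1) =
            mcgInner L M (L.length : Int) L.length (s + L[i]) (i : Int) := by
          have := mcgInner_unfold L M (L.length : Int) L.length s ((i : Int) - 1)
            (by omega) (by rw [hj0, gi]; exact ⟨hNi, by omega⟩)
          rw [hj0, gi] at this
          exact this
        rw [hstepin]
        have hge := mcgInner_ge L M (L.length : Int) L.length (s + L[i]) (i : Int)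
        have hlt : (i : Int) < (mcgInner L M (L.length : Int) L.length (s + L[i]) (i : Int)).2 + 1 := by omega
        conv_rhs => rw [PySem.List.pyRange_one_cons hlt]
        simp

-- ===== VERDICT (by name: the statement is the Claim_ definition above) =====
theorem merge_chunks_greedy_spec : Claim_equal_merge_chunks_greedy := by
  intro lengths maxLength _
  have h := (mcg_main lengths maxLength lengths.length 0 (by omega) rfl).1 []
  simp only [List.drop_zero, Nat.cast_zero, List.nil_append] at h
  unfold Spec_merge_chunks_greedy merge_chunks_greedy merge_chunks_greedy_alt
  rw [← h]
  rfl
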